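-- pv_equiv track=rewrite | github.com/jeromeboivin/pythonic | gui/drum_generator_dialog.py | _build_trigger_table_from_dict
-- ===== SOURCE A (Python) =====
-- def _build_trigger_table_from_dict(pat_data: dict) -> list[list[int]]:
--     """Build a 16-step trigger table from a generated pattern dict."""
--     triggers_table = [[] for _ in range(16)]
--     for ch_idx in range(8):
--         ch_key = str(ch_idx + 1)
--         ch_data = pat_data.get(ch_key, {})
--         if isinstance(ch_data, dict):
--             triggers_str = ch_data.get("Triggers", "")
--             for step in range(min(16, len(triggers_str))):
--                 if triggers_str[step] == "#":
--                     triggers_table[step].append(ch_idx)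
--     return triggers_table
-- ===== SOURCE B (Python) =====
-- def _build_trigger_table_from_dict(pat_data: dict) -> list[list[int]]:
--     """Build a 16-step trigger table from a generated pattern dict."""
--     triggers = []
--     for ch in range(8):
--         ch_data = pat_data.get(str(ch + 1), {})
--         triggers.append(ch_data.get("Triggers", "") if isinstance(ch_data, dict) else "")
--     return [[ch for ch in range(8)
--              if step < len(triggers[ch]) and triggers[ch][step] == '#']
--             for step in range(16)]
-- ===== Notes on version B (the rewrite author's own statement) =====
-- stated objective: simpler
-- what changed: B first extracts the eight per-channel Triggers strings into a list, then builds the table step-major with a nested comprehension (step outer, channel inner), replacing A's channel-outer scatter-append into a mutable 16-row table.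
import Mathlib
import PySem

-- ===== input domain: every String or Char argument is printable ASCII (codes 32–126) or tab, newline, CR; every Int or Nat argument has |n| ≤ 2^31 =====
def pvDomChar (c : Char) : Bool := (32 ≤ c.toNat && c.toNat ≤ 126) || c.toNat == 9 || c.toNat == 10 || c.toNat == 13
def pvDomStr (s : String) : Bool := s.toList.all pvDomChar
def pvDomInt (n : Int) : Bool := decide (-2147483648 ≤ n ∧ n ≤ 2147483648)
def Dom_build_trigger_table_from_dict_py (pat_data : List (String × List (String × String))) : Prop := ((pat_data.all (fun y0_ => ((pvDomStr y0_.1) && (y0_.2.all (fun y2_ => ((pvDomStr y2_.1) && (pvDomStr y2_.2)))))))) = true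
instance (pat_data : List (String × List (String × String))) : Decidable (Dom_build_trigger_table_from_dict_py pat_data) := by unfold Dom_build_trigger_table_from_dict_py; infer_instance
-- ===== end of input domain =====

-- B builds the eight Triggers strings first, then the table step-major by a nested
-- comprehension, instead of A's channel-outer scatter-append into a mutable table.

-- shared helper: Python dict.get(k, dflt) on an association list (first match)
def pyAssocGetD {ν : Type} (d : List (String × ν)) (k : String) (dflt : ν) : ν :=
  (d.lookup k).getD dflt

-- the Triggers string (as chars) for channel ch; in the typed model every value
-- of pat_data is a dict of strings, so A's isinstance(ch_data, dict) guard is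
-- always true and ch_data.get("Triggers", "") is this lookup chain.
def trigOf (pat_data : List (String × List (String × String))) (ch : Nat) : List Char :=
  (pyAssocGetD (pyAssocGetD pat_data (PySem.Int.toStr ((ch : Int) + 1)) []) "Triggers" "").toList

-- ===== PORT A =====
def build_trigger_table_from_dict_py (pat_data : List (String × List (String × String))) : List (List Int) :=
  (List.range 8).foldl (fun table ch =>
    let ts := trigOf pat_data ch
    (List.range (min 16 ts.length)).foldl (fun table step =>
      if ts.getD step ' ' = '#' then
        table.set step ((table.getD step []) ++ [(ch : Int)])
      else table) table)
    (List.replicate 16 ([] : List Int))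

-- ===== PORT B =====
def build_trigger_table_from_dict_py_alt (pat_data : List (String × List (String × String))) : List (List Int) :=
  let triggers := (List.range 8).map (fun ch => trigOf pat_data ch)
  (List.range 16).map (fun step =>
    ((List.range 8).filter (fun ch =>
        decide (step < (triggers.getD ch []).length) &&
        ((triggers.getD ch []).getD step ' ' == '#'))).map (fun ch => (ch : Int)))

-- ===== PRECONDITION & SPEC =====
def Spec_build_trigger_table_from_dict_py (pat_data : List (String × List (String × String))) (out : List (List Int)) : Prop := out = build_trigger_table_from_dict_py_alt pat_data
instance (pat_data : List (String × List (String × String))) (out : List (List Int)) : Decidable (Spec_build_trigger_table_from_dict_py pat_data out) := by unfold Spec_build_trigger_table_from_dict_py; infer_instance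

-- ===== CLAIM (what is proved, stated in full; the proofs are below) =====
def Claim_equal_build_trigger_table_from_dict_py : Prop := ∀ (pat_data : List (String × List (String × String))), Dom_build_trigger_table_from_dict_py pat_data → Spec_build_trigger_table_from_dict_py pat_data (build_trigger_table_from_dict_py pat_data)

-- ===== LEMMAS AND PROOFS =====

-- A's inner step loop for one channel
def innerFold (ts : List Char) (c : Int) (n : Nat) (t : List (List Int)) : List (List Int) :=
  (List.range n).foldl (fun table step =>
    if ts.getD step ' ' = '#' then
      table.set step ((table.getD step []) ++ [c])
    else table) t

theorem innerFold_succ (ts : List Char) (c : Int) (n : Nat) (t : List (List Int)) :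
    innerFold ts c (n+1) t =
      (if ts.getD n ' ' = '#' then
        (innerFold ts c n t).set n (((innerFold ts c n t).getD n []) ++ [c])
      else innerFold ts c n t) := by
  simp only [innerFold, List.range_succ, List.foldl_append, List.foldl_cons, List.foldl_nil]

theorem innerFold_length (ts : List Char) (c : Int) (n : Nat) (t : List (List Int)) :
    (innerFold ts c n t).length = t.length := by
  induction n with
  | zero => rfl
  | succ n ih =>
      rw [innerFold_succ]
      split_ifs with h
      · rw [List.length_set]; exact ih
      · exact ih

theorem innerFold_getD (ts : List Char) (c : Int) (n : Nat) (t : List (List Int))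
    (hn : n ≤ t.length) (j : Nat) :
    (innerFold ts c n t).getD j [] =
      if j < n ∧ ts.getD j ' ' = '#' then t.getD j [] ++ [c] else t.getD j [] := by
  induction n with
  | zero => simp [innerFold]
  | succ n ih =>
      have hn' : n ≤ t.length := Nat.le_of_succ_le hn
      have hlen : (innerFold ts c n t).length = t.length := innerFold_length ts c n t
      rw [innerFold_succ]
      by_cases hp : ts.getD n ' ' = '#'
      · rw [if_pos hp]
        by_cases hj : j = n
        · subst hj
          have hjl : j < t.length := lt_of_lt_of_le (Nat.lt_succ_self j) hn
          rw [List.getD_eq_getElem?_getD, List.getElem?_set_self (by omega), Option.getD_some]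
          rw [ih hn']
          have hp' : ts[j]?.getD ' ' = '#' := by rw [← List.getD_eq_getElem?_getD]; exact hp
          simp [hp']
        · rw [List.getD_eq_getElem?_getD, List.getElem?_set_ne (by omega),
            ← List.getD_eq_getElem?_getD]
          rw [ih hn']
          congr 1
          simp only [eq_iff_iff]
          constructor
          · rintro ⟨h1, h2⟩; exact ⟨Nat.lt_succ_of_lt h1, h2⟩
          · rintro ⟨h1, h2⟩; exact ⟨by omega, h2⟩
      · rw [if_neg hp, ih hn']
        congr 1
        simp only [eq_iff_iff]
        constructor
        · rintro ⟨h1, h2⟩; exact ⟨Nat.lt_succ_of_lt h1, h2⟩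
        · rintro ⟨h1, h2⟩
          refine ⟨?_, h2⟩
          rcases Nat.lt_succ_iff_lt_or_eq.mp h1 with h | h
          · exact h
          · exact absurd h2 (h ▸ hp)

-- predicate: channel c fires at step j
def firesAt (pat_data : List (String × List (String × String))) (j c : Nat) : Bool :=
  decide (j < (trigOf pat_data c).length) && ((trigOf pat_data c).getD j ' ' == '#')

theorem chanFold_length (pat_data : List (String × List (String × String)))
    (chs : List Nat) (t : List (List Int)) :
    (chs.foldl (fun table ch => innerFold (trigOf pat_data ch) (ch : Int)
        (min 16 (trigOf pat_data ch).length) table) t).length = t.length := by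
  induction chs generalizing t with
  | nil => rfl
  | cons c chs ih => simp only [List.foldl_cons]; rw [ih, innerFold_length]

theorem chanFold_getD (pat_data : List (String × List (String × String)))
    (chs : List Nat) (t : List (List Int)) (ht : t.length = 16) (j : Nat) (hj : j < 16) :
    (chs.foldl (fun table ch => innerFold (trigOf pat_data ch) (ch : Int)
        (min 16 (trigOf pat_data ch).length) table) t).getD j [] =
      t.getD j [] ++ (chs.filter (firesAt pat_data j)).map (fun c => (c : Int)) := by
  induction chs generalizing t with
  | nil => simp
  | cons c chs ih =>
      simp only [List.foldl_cons]
      have hlen : (innerFold (trigOf pat_data c) (c : Int)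
          (min 16 (trigOf pat_data c).length) t).length = 16 := by
        rw [innerFold_length]; exact ht
      rw [ih _ hlen]
      rw [innerFold_getD (trigOf pat_data c) (c : Int)
          (min 16 (trigOf pat_data c).length) t (by omega) j]
      by_cases hfire : firesAt pat_data j c = true
      · have hf := hfire
        unfold firesAt at hf
        rw [Bool.and_eq_true, decide_eq_true_iff, beq_iff_eq] at hf
        rw [List.filter_cons_of_pos hfire]
        rw [if_pos ⟨by omega, hf.2⟩]
        simp [List.append_assoc]
      · rw [List.filter_cons_of_neg (by simpa using hfire)]
        unfold firesAt at hfire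
        rw [Bool.and_eq_true, decide_eq_true_iff, beq_iff_eq] at hfire
        rw [if_neg (by rintro ⟨h1, h2⟩; exact hfire ⟨by omega, h2⟩)]

theorem getD_replicate16 (i : Nat) : (List.replicate 16 ([] : List Int)).getD i [] = [] := by
  rcases Nat.lt_or_ge i 16 with h' | h'
  · rw [List.getD_eq_getElem?_getD, List.getElem?_replicate]; simp [h']
  · rw [List.getD_eq_getElem?_getD, List.getElem?_eq_none (by simpa using h')]; rfl

-- ===== VERDICT (by name: the statement is the Claim_ definition above) =====
theorem build_trigger_table_from_dict_py_spec : Claim_equal_build_trigger_table_from_dict_py := by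
  intro pat_data _
  unfold Spec_build_trigger_table_from_dict_py
  show build_trigger_table_from_dict_py pat_data = build_trigger_table_from_dict_py_alt pat_data
  have hA : build_trigger_table_from_dict_py pat_data =
      (List.range 8).foldl (fun table ch => innerFold (trigOf pat_data ch) (ch : Int)
        (min 16 (trigOf pat_data ch).length) table) (List.replicate 16 ([] : List Int)) := rfl
  have hlenA : (build_trigger_table_from_dict_py pat_data).length = 16 := by
    rw [hA, chanFold_length]; simp
  have hlenB : (build_trigger_table_from_dict_py_alt pat_data).length = 16 := by
    simp [build_trigger_table_from_dict_py_alt]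
  apply List.ext_getElem (by rw [hlenA, hlenB])
  intro j hj1 hj2
  have hj : j < 16 := by omega
  have hAe : (build_trigger_table_from_dict_py pat_data).getD j [] =
      (List.filter (firesAt pat_data j) (List.range 8)).map (fun c => (c : Int)) := by
    rw [hA, chanFold_getD pat_data _ _ (by simp) j hj, getD_replicate16]
    simp
  have hBe : (build_trigger_table_from_dict_py_alt pat_data).getD j [] =
      (List.filter (firesAt pat_data j) (List.range 8)).map (fun c => (c : Int)) := by
    simp only [build_trigger_table_from_dict_py_alt]
    rw [List.getD_eq_getElem?_getD, List.getElem?_map, List.getElem?_range hj]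
    simp only [Option.map_some, Option.getD_some]
    congr 1
  have h1 : (build_trigger_table_from_dict_py pat_data)[j] =
      (build_trigger_table_from_dict_py pat_data).getD j [] := by
    rw [List.getD_eq_getElem?_getD, List.getElem?_eq_getElem hj1]; rfl
  have h2 : (build_trigger_table_from_dict_py_alt pat_data)[j] =
      (build_trigger_table_from_dict_py_alt pat_data).getD j [] := by
    rw [List.getD_eq_getElem?_getD, List.getElem?_eq_getElem hj2]; rfl
  exact h1.trans (hAe.trans (hBe.symm.trans h2.symm))
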